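-- pv_equiv track=rewrite | github.com/Chesedd/LightConductor | src/lightconductor/application/patterns.py | moving_window_frames
-- ===== SOURCE A (Python) =====
-- from typing import List
--
-- def moving_window_frames(led_count: int, window_size: int, rgb: List[int]) -> List[List[List[int]]]:
--     if led_count <= 0:
--         return []
--     if window_size <= 0:
--         window_size = 1
--     window_size = min(window_size, led_count)
--     off = [0, 0, 0]
--     frames: List[List[List[int]]] = []
--     for start in range(0, led_count - window_size + 1):
--         frame = [list(off) for _ in range(led_count)]
--         for i in range(start, start + window_size):
--             frame[i] = list(rgb)
--         frames.append(frame)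
--     return frames
-- ===== SOURCE B (Python) =====
-- from typing import List
--
-- def moving_window_frames(led_count: int, window_size: int, rgb: List[int]) -> List[List[List[int]]]:
--     if led_count <= 0:
--         return []
--     n = led_count
--     w = max(1, min(window_size, n))
--     # Precompute one template strip: the lit window flanked on both sides by
--     # enough off-cells; every frame is then just a length-n sliding slice of it.
--     strip = [[0, 0, 0]] * (n - w) + [list(rgb)] * w + [[0, 0, 0]] * (n - w)
--     return [[list(cell) for cell in strip[n - w - s : 2 * n - w - s]]
--             for s in range(n - w + 1)]
-- ===== Notes on version B (the rewrite author's own statement) =====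
-- stated objective: alternative
-- what changed: B precomputes a single template strip (off-padding, lit window, off-padding) and produces every frame as a sliding length-n slice of that strip, instead of constructing each frame separately by overwriting an all-off frame.
import Mathlib
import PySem

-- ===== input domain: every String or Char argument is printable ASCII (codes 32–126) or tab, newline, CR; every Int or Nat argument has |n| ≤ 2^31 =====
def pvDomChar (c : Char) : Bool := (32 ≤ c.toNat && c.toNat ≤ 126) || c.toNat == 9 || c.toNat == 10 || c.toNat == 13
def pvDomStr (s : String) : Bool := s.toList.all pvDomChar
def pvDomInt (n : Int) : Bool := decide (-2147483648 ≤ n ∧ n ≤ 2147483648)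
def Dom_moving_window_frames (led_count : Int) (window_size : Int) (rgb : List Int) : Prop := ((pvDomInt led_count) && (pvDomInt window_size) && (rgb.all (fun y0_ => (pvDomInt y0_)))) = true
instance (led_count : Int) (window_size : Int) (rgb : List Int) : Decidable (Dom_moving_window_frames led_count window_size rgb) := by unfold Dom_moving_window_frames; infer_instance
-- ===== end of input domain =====

-- B precomputes one template strip (off-padding, lit window, off-padding) and yields every
-- frame as a sliding slice of that strip, instead of overwriting an all-off frame per start.

-- ===== PORT A =====
def moving_window_frames (led_count : Int) (window_size : Int) (rgb : List Int) : List (List (List Int)) :=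
  if led_count ≤ 0 then []
  else
    let window_size := if window_size ≤ 0 then 1 else window_size
    let window_size := min window_size led_count
    let off : List Int := [0, 0, 0]
    (PySem.List.pyRange 0 (led_count - window_size + 1) 1).foldl
      (fun frames start =>
        let frame := (PySem.List.pyRange 0 led_count 1).map (fun _ => off)
        let frame := (PySem.List.pyRange start (start + window_size) 1).foldl
          (fun fr i => PySem.List.pySetD fr i rgb) frame
        frames ++ [frame]) []

-- ===== PORT B =====
-- Python's '[x] * k' list repetition is ported as List.replicate; 'list(cell)' copies are value-identity maps.
def moving_window_frames_alt (led_count : Int) (window_size : Int) (rgb : List Int) : List (List (List Int)) :=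
  if led_count ≤ 0 then []
  else
    let n := led_count
    let w := max 1 (min window_size n)
    let strip : List (List Int) :=
      List.replicate (n - w).toNat ([0, 0, 0] : List Int)
        ++ List.replicate w.toNat rgb
        ++ List.replicate (n - w).toNat ([0, 0, 0] : List Int)
    (PySem.List.pyRange 0 (n - w + 1) 1).map (fun s =>
      (PySem.List.slice strip (some (n - w - s)) (some (2 * n - w - s))).map (fun cell => cell))

-- ===== PRECONDITION & SPEC =====
def Spec_moving_window_frames (led_count : Int) (window_size : Int) (rgb : List Int) (out : List (List (List Int))) : Prop := out = moving_window_frames_alt led_count window_size rgb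
instance (led_count : Int) (window_size : Int) (rgb : List Int) (out : List (List (List Int))) : Decidable (Spec_moving_window_frames led_count window_size rgb out) := by unfold Spec_moving_window_frames; infer_instance

-- ===== CLAIM (what is proved, stated in full; the proofs are below) =====
def Claim_equal_moving_window_frames : Prop := ∀ (led_count : Int) (window_size : Int) (rgb : List Int), Dom_moving_window_frames led_count window_size rgb → Spec_moving_window_frames led_count window_size rgb (moving_window_frames led_count window_size rgb)

-- ===== LEMMAS AND PROOFS =====

-- the inner assignment loop over Nat indices turns a list into take/replicate/drop segments
lemma setLoop_eq (rgb : List Int) (w : Nat) : ∀ (s : Nat) (l : List (List Int)), s + w ≤ l.length →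
    (List.range w).foldl (fun fr k => fr.set (s + k) rgb) l
      = l.take s ++ List.replicate w rgb ++ l.drop (s + w) := by
  induction w with
  | zero =>
    intro s l h
    simp [List.take_append_drop]
  | succ w ih =>
    intro s l h
    rw [List.range_succ, List.foldl_append]
    simp only [List.foldl_cons, List.foldl_nil]
    rw [ih s l (by omega)]
    have hlen : s + w < (l.take s ++ List.replicate w rgb ++ l.drop (s + w)).length := by
      simp [List.length_take, List.length_drop]; omega
    rw [List.set_eq_take_append_cons_drop, if_pos hlen]
    have hAB : (l.take s ++ List.replicate w rgb).length = s + w := by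
      simp [List.length_take]; omega
    have htake : (l.take s ++ List.replicate w rgb ++ l.drop (s + w)).take (s + w)
        = l.take s ++ List.replicate w rgb := List.take_left' hAB
    have hdrop : (l.take s ++ List.replicate w rgb ++ l.drop (s + w)).drop (s + w + 1)
        = l.drop (s + w + 1) := by
      have : s + w + 1 = (l.take s ++ List.replicate w rgb).length + 1 := by omega
      rw [this, ← List.drop_drop, List.drop_left, List.drop_drop, hAB]
    rw [htake, hdrop, List.replicate_succ']
    simp
    omega

lemma map_const_pyRange (n : Int) (x : List Int) :
    (PySem.List.pyRange 0 n 1).map (fun _ => x) = List.replicate n.toNat x := by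
  have hlen : ((PySem.List.pyRange 0 n 1).map (fun _ => x)).length = n.toNat := by
    simp [PySem.List.length_pyRange_one]
  rw [← hlen]
  exact List.eq_replicate_of_mem (by simp)

-- B's sliding slice of the template strip is exactly the three-segment frame
lemma slice_strip_eq (rgb : List Int) (p w s n : Nat) (hs : s ≤ p) (hn : n = p + w) :
    ((List.replicate p ([0,0,0] : List Int) ++ List.replicate w rgb ++ List.replicate p ([0,0,0] : List Int)).drop (p - s)).take n
      = List.replicate s ([0,0,0] : List Int) ++ List.replicate w rgb ++ List.replicate (n - s - w) ([0,0,0] : List Int) := by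
  rw [List.append_assoc, List.drop_append_of_le_length (by simp only [List.length_replicate]; omega),
      List.drop_replicate]
  have h1 : p - (p - s) = s := by omega
  rw [h1, ← List.append_assoc]
  have h2 : (List.replicate s ([0,0,0] : List Int) ++ List.replicate w rgb).length = s + w := by simp
  have h4 : n = (List.replicate s ([0,0,0] : List Int) ++ List.replicate w rgb).length + (n - s - w) := by
    rw [h2]; omega
  rw [h4, List.take_append, List.take_replicate]
  simp only [h2]
  have h3 : min (s + w + (n - s - w) - (s + w)) p = n - s - w := by omega
  have h5 : s + w + (n - s - w) - s - w = n - s - w := by omega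
  rw [h3, h5, List.take_of_length_le (by simp only [h2]; omega), List.append_assoc]

-- ===== VERDICT (by name: the statement is the Claim_ definition above) =====
theorem moving_window_frames_spec : Claim_equal_moving_window_frames := by
  intro led ws rgb _
  unfold Spec_moving_window_frames moving_window_frames moving_window_frames_alt
  by_cases hle : led ≤ 0
  · simp [hle]
  · simp only [if_neg hle]
    have hpos : 0 < led := by omega
    have hw : min (if ws ≤ 0 then 1 else ws) led = max 1 (min ws led) := by
      split_ifs <;> omega
    rw [hw]
    set w : Int := max 1 (min ws led) with hwdef
    have hw1 : 1 ≤ w := by omega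
    have hwle : w ≤ led := by omega
    rw [PySem.List.foldl_append_eq_flatMap]
    rw [List.nil_append, ← List.map_eq_flatMap]
    apply List.map_congr_left
    intro start hstart
    rw [PySem.List.mem_pyRange_one] at hstart
    obtain ⟨hs0, hslt⟩ := hstart
    -- A side: inner loop over indices start .. start+w-1
    have hr : PySem.List.pyRange start (start + w) 1
        = (List.range w.toNat).map (fun k : Nat => start + (k : Int)) := by
      rw [PySem.List.pyRange_one]
      have h2 : start + w - start = w := by omega
      rw [h2]
    rw [hr, List.foldl_map]
    have hfun : (fun (fr : List (List Int)) (k : Nat) => PySem.List.pySetD fr (start + (k : Int)) rgb)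
        = (fun fr k => fr.set (start.toNat + k) rgb) := by
      funext fr k
      rw [PySem.List.pySetD_of_nonneg fr rgb (by omega)]
      congr 1
      omega
    rw [hfun, map_const_pyRange led, setLoop_eq rgb w.toNat start.toNat _ (by simp; omega)]
    rw [List.take_replicate, List.drop_replicate]
    -- B side: slice of the strip
    rw [PySem.List.slice_toNat _ (by omega) (by omega), List.map_id']
    have ha : (led - w - start).toNat = (led - w).toNat - start.toNat := by omega
    have hb : (2 * led - w - start).toNat - ((led - w).toNat - start.toNat) = led.toNat := by omega
    rw [ha, hb, slice_strip_eq rgb (led - w).toNat w.toNat start.toNat led.toNat (by omega) (by omega)]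
    rw [show min start.toNat led.toNat = start.toNat by omega,
        show led.toNat - (start.toNat + w.toNat) = led.toNat - start.toNat - w.toNat by omega]
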